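-- pv_equiv track=rewrite | github.com/edomonndo/python-library | math_/sum_of_difference.py | sum_of_difference
-- ===== SOURCE A (Python) =====
-- def sum_of_difference(n, arr):
--     """Sum of $Ai$ - $Aj$ where $0<=i<j<N$."""
--     accum = [0]
--     for item in arr:
--         accum.append(accum[-1] + item)
--     res = accum[n] * n
--     for i, item in enumerate(arr):
--         res -= accum[i] + (n - i) * item
--     return res
-- ===== SOURCE B (Python) =====
-- def sum_of_difference(n, arr):
--     """Sum of Ai - Aj over 0<=i<j<n via per-element closed-form weights."""
--     m = len(arr)
--     head = n * sum(arr[:n])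
--     return head - sum(item * (m + n - 1 - 2 * k) for k, item in enumerate(arr))
-- ===== Notes on version B (the rewrite author's own statement) =====
-- stated objective: simpler
-- what changed: B drops A's explicitly built prefix-sum array: it computes the answer as n*sum(arr[:n]) minus one weighted pass with the closed-form coefficient (len+n-1-2k); Pre_ excludes negative n, where A's accum[n] only returns via Python negative-index wraparound into its internal prefix array (an accidental corner no caller of this 'sum over 0<=i<j<N' helper would specify), and n>len(arr), where A raises IndexError.
-- outside the precondition, e.g. on sum_of_difference(-1, [1, 2, 3]): A returns 4, B returns 7
import Mathlib
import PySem

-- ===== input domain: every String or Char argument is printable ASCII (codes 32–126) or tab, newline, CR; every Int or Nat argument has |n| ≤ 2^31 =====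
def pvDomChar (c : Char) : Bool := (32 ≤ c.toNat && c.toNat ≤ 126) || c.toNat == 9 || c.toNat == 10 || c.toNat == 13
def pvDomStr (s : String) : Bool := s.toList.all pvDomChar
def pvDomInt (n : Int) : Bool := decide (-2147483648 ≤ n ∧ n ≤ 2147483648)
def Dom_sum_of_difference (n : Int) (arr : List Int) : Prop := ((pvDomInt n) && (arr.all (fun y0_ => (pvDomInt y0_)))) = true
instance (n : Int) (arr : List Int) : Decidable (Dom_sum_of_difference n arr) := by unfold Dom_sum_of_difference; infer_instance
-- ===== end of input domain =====

-- B replaces A's prefix-sum array by one slice sum plus one weighted pass with a closed-form coefficient (simpler, O(1) extra space).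

-- ===== PORT A =====
def sum_of_difference (n : Int) (arr : List Int) : Int :=
  let accum := arr.foldl (fun acc item => acc ++ [PySem.List.pyGetD acc (-1) 0 + item]) [0]
  let res := PySem.List.pyGetD accum n 0 * n
  (PySem.List.enumerate arr 0).foldl
    (fun res p => res - (PySem.List.pyGetD accum p.1 0 + (n - p.1) * p.2)) res

-- ===== PORT B =====
def sum_of_difference_alt (n : Int) (arr : List Int) : Int :=
  let m : Int := arr.length
  let head := n * (PySem.List.slice arr none (some n)).sum
  head - ((PySem.List.enumerate arr 0).map (fun p => p.2 * (m + n - 1 - 2 * p.1))).sum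

-- ===== PRECONDITION & SPEC =====
-- Pre_ excludes n > len(arr) (A raises IndexError at accum[n]) and negative n, on which
-- A's value arises only from Python negative-index wraparound into its internal prefix-sum
-- array — an accidental corner no caller of this 0<=i<j<N helper would specify.
def Pre_sum_of_difference (n : Int) (arr : List Int) : Prop :=
  0 ≤ n ∧ n ≤ (arr.length : Int)
instance (n : Int) (arr : List Int) : Decidable (Pre_sum_of_difference n arr) := by
  unfold Pre_sum_of_difference; infer_instance
def pvWitness_sum_of_difference : Int × List Int := (3, [4, -1, 7])

def Spec_sum_of_difference (n : Int) (arr : List Int) (out : Int) : Prop := out = sum_of_difference_alt n arr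
instance (n : Int) (arr : List Int) (out : Int) : Decidable (Spec_sum_of_difference n arr out) := by unfold Spec_sum_of_difference; infer_instance

-- ===== CLAIM (what is proved, stated in full; the proofs are below) =====
def Claim_equal_sum_of_difference : Prop := ∀ (n : Int) (arr : List Int), Dom_sum_of_difference n arr → Pre_sum_of_difference n arr → Spec_sum_of_difference n arr (sum_of_difference n arr)

-- ===== LEMMAS AND PROOFS =====

-- A's accum is the list of prefix sums [sum (take i arr) | i ∈ range (len+1)].
theorem accum_foldl_eq (arr : List Int) (pre : List Int) (s : Int) :
    arr.foldl (fun acc item => acc ++ [PySem.List.pyGetD acc (-1) 0 + item]) (pre ++ [s])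
      = pre ++ [s] ++ (List.range arr.length).map (fun i => s + (arr.take (i+1)).sum) := by
  induction arr generalizing pre s with
  | nil => simp
  | cons a l ih =>
      simp only [List.foldl_cons, PySem.List.pyGetD_neg_one_append_singleton]
      rw [show pre ++ [s] ++ [s + a] = (pre ++ [s]) ++ [s + a] by simp, ih]
      simp only [List.length_cons, List.range_succ_eq_map, List.map_cons, List.map_map]
      simp [List.take_succ_cons, add_assoc, Function.comp]

theorem accum_eq (arr : List Int) :
    arr.foldl (fun acc item => acc ++ [PySem.List.pyGetD acc (-1) 0 + item]) [0]
      = (List.range (arr.length + 1)).map (fun i => (arr.take i).sum) := by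
  have h := accum_foldl_eq arr [] 0
  simp only [List.nil_append] at h
  rw [h, List.range_succ_eq_map]
  simp

-- foldl that only subtracts is init minus the sum of the mapped list
theorem foldl_sub_eq {α : Type} (f : α → Int) (l : List α) (r : Int) :
    l.foldl (fun r p => r - f p) r = r - (l.map f).sum := by
  induction l generalizing r with
  | nil => simp
  | cons a t ih => simp [ih, sub_sub]

-- the combinatorial identity: Σ_k (sum(take k arr) + (n-k)·arr[k]) = Σ_k arr[k]·(m+n−1−2k)
theorem sum_prefix_sums (arr : List Int) (n : Int) :
    ((PySem.List.enumerate arr 0).map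
        (fun p => ((arr.take p.1.toNat).sum + (n - p.1) * p.2))).sum
      = ((PySem.List.enumerate arr 0).map
        (fun p => p.2 * ((arr.length : Int) + n - 1 - 2 * p.1))).sum := by
  induction arr using List.reverseRecOn with
  | nil => simp [PySem.List.enumerate]
  | append_singleton l b ih =>
      rw [PySem.List.enumerate_append]
      simp only [List.map_append, List.sum_append]
      have hl : ∀ p ∈ PySem.List.enumerate l 0,
          (((l ++ [b]).take p.1.toNat).sum + (n - p.1) * p.2)
            = ((l.take p.1.toNat).sum + (n - p.1) * p.2) := by
        intro p hp
        rcases (PySem.List.mem_enumerate_iff l 0 p).1 hp with ⟨k, hk, rfl⟩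
        simp only [zero_add, Int.toNat_natCast]
        rw [List.take_append_of_le_length (le_of_lt hk)]
      have hr : ∀ p ∈ PySem.List.enumerate l 0,
          (p.2 * (((l ++ [b]).length : Int) + n - 1 - 2 * p.1))
            = (p.2 * ((l.length : Int) + n - 1 - 2 * p.1) + p.2) := by
        intro p hp
        simp only [List.length_append, List.length_cons, List.length_nil]
        push_cast
        ring
      rw [List.map_congr_left hl, List.map_congr_left hr]
      have hsnd : (List.map (fun p => p.2) (PySem.List.enumerate l 0)).sum = l.sum := by
        rw [PySem.List.map_snd_enumerate]
      have hsplit : (List.map (fun p => p.2 * ((l.length : Int) + n - 1 - 2 * p.1) + p.2)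
            (PySem.List.enumerate l 0)).sum
          = (List.map (fun p => p.2 * ((l.length : Int) + n - 1 - 2 * p.1))
              (PySem.List.enumerate l 0)).sum
            + (List.map (fun p => p.2) (PySem.List.enumerate l 0)).sum := List.sum_map_add
      rw [hsplit, hsnd, ih]
      simp only [PySem.List.enumerate_cons, PySem.List.enumerate_nil, List.map_cons,
        List.map_nil, List.sum_cons, List.sum_nil, zero_add, Int.toNat_natCast,
        List.take_left, List.length_append, List.length_cons, List.length_nil]
      push_cast
      ring

-- value of accum at an in-range index
theorem accum_getD (arr : List Int) (i : Int) (h0 : 0 ≤ i) (h1 : i ≤ (arr.length : Int)) :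
    PySem.List.pyGetD ((List.range (arr.length + 1)).map (fun j => (arr.take j).sum)) i 0
      = (arr.take i.toNat).sum := by
  rw [PySem.List.pyGetD_eq_getElem _ 0 h0 (by simp; omega)]
  have ht : i.toNat < (List.range (arr.length + 1)).length := by simp; omega
  simp

-- the main equivalence, unfolded
theorem main_eq (n : Int) (arr : List Int) (hp : Pre_sum_of_difference n arr) :
    sum_of_difference n arr = sum_of_difference_alt n arr := by
  obtain ⟨h0, hhi⟩ := hp
  unfold sum_of_difference sum_of_difference_alt
  simp only [accum_eq, foldl_sub_eq]
  have hbody : ∀ p ∈ PySem.List.enumerate arr 0,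
      (PySem.List.pyGetD ((List.range (arr.length + 1)).map (fun j => (arr.take j).sum)) p.1 0
         + (n - p.1) * p.2)
        = ((arr.take p.1.toNat).sum + (n - p.1) * p.2) := by
    intro p hp
    rcases (PySem.List.mem_enumerate_iff arr 0 p).1 hp with ⟨k, hk, rfl⟩
    simp only [zero_add]
    rw [accum_getD arr k (by omega) (by exact_mod_cast le_of_lt hk)]
  rw [List.map_congr_left hbody, sum_prefix_sums arr n]
  rw [accum_getD arr n h0 hhi, PySem.List.slice_to arr h0]
  ring

-- ===== VERDICT (by name: the statement is the Claim_ definition above) =====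
theorem sum_of_difference_spec : Claim_equal_sum_of_difference := by
  intro n arr _ hp
  unfold Spec_sum_of_difference
  exact main_eq n arr hp
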